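-- pv_equiv track=rewrite | github.com/smilstea/IOS-XR-Maintenance-Window-Checker | ios_xr_mw_comparer.py | show_pfm_loc_all_totals
-- ===== SOURCE A (Python) =====
-- def show_pfm_loc_all_totals(sh_cmd_dict):
--     ###__author__     = "Sam Milstead"
--     ###__copyright__  = "Copyright 2020 (C) Cisco TAC"
--     ###__version__    = "1.1.1"
--     ###__status__     = "alpha"
--     #Perform some magic on the pre and post lines of output for show pfm loc all
--     #Each line being an item in a list
--     #Determine alarm state
--     counters = {'Total Nodes': 0, 'Total Alarms': 0, 'Total Emergency/Alert alarms': 0, 'Total Critical Alarms': 0, 'Total Error Alarms': 0}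
--     for key in sh_cmd_dict:
--         counters['Total Nodes'] += 1
--         for value in sh_cmd_dict[key]:
--             if "NO" not in sh_cmd_dict[key][value]:
--                 counters['Total Alarms'] += 1
--                 if "E/A" in sh_cmd_dict[key][value]:
--                     counters['Total Emergency/Alert alarms'] += 1
--                 if "CR" in sh_cmd_dict[key][value]:
--                     counters['Total Critical Alarms'] += 1
--                 if "ER" in sh_cmd_dict[key][value]:
--                     counters['Total Error Alarms'] += 1
--     return counters
-- ===== SOURCE B (Python) =====
-- def show_pfm_loc_all_totals(sh_cmd_dict):
--     # Flat list of active-alarm cells first, then independent scans for each total.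
--     alarms = [sh_cmd_dict[k][v] for k in sh_cmd_dict for v in sh_cmd_dict[k]
--               if "NO" not in sh_cmd_dict[k][v]]
--     return {'Total Nodes': len(sh_cmd_dict),
--             'Total Alarms': len(alarms),
--             'Total Emergency/Alert alarms': sum("E/A" in x for x in alarms),
--             'Total Critical Alarms': sum("CR" in x for x in alarms),
--             'Total Error Alarms': sum("ER" in x for x in alarms)}
-- ===== Notes on version B (the rewrite author's own statement) =====
-- stated objective: simpler
-- what changed: Replaces the fused nested counting loop over a mutable counter dict by building a flat list of active-alarm strings once and computing each total as an independent len/sum over that list.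
import Mathlib
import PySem

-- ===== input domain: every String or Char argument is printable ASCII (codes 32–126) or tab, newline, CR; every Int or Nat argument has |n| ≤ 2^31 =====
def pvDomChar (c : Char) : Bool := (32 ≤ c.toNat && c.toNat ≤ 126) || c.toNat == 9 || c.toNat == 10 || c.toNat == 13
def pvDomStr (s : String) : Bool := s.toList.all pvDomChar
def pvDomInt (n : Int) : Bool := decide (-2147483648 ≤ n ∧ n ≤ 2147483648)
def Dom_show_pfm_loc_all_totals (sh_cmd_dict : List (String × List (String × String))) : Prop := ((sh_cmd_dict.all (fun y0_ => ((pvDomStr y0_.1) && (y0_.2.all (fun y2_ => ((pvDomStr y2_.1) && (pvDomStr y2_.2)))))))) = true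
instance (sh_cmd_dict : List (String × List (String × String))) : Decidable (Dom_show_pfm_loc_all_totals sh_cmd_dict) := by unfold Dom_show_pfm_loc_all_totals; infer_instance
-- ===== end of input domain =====

-- B builds the flat list of active-alarm strings once and computes each total by an
-- independent len/sum scan, instead of A's fused nested loop over a mutable counter dict.


-- ===== PORT A =====
-- A iterates the outer dict, counts each node, and for each inner cell whose text does not
-- contain "NO" bumps the alarm counters in a mutable counter dict; the dict parameter is an
-- association list, so both ports read it through PySem.Dict.ofList (Python dict semantics).
def show_pfm_loc_all_totals (sh_cmd_dict : List (String × List (String × String))) : List (String × Int) :=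
  let d := PySem.Dict.ofList sh_cmd_dict
  let counters : PySem.Dict String Int :=
    PySem.Dict.ofList [("Total Nodes", 0), ("Total Alarms", 0),
      ("Total Emergency/Alert alarms", 0), ("Total Critical Alarms", 0), ("Total Error Alarms", 0)]
  let counters := d.items.foldl (fun (c : PySem.Dict String Int) kv =>
    let c := c.modify "Total Nodes" 0 (· + 1)
    (PySem.Dict.ofList kv.2).items.foldl (fun (c : PySem.Dict String Int) vv =>
      if PySem.Str.isIn "NO" vv.2 then c
      else
        let c := c.modify "Total Alarms" 0 (· + 1)
        let c := if PySem.Str.isIn "E/A" vv.2 then c.modify "Total Emergency/Alert alarms" 0 (· + 1) else c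
        let c := if PySem.Str.isIn "CR" vv.2 then c.modify "Total Critical Alarms" 0 (· + 1) else c
        if PySem.Str.isIn "ER" vv.2 then c.modify "Total Error Alarms" 0 (· + 1) else c) c) counters
  counters.items

-- ===== PORT B =====
def show_pfm_loc_all_totals_alt (sh_cmd_dict : List (String × List (String × String))) : List (String × Int) :=
  let d := PySem.Dict.ofList sh_cmd_dict
  let alarms : List String := d.items.flatMap (fun kv =>
    ((PySem.Dict.ofList kv.2).items.filter (fun vv => !PySem.Str.isIn "NO" vv.2)).map (·.2))
  [("Total Nodes", (d.size : Int)),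
   ("Total Alarms", (alarms.length : Int)),
   ("Total Emergency/Alert alarms", ((alarms.filter (fun x => PySem.Str.isIn "E/A" x)).length : Int)),
   ("Total Critical Alarms", ((alarms.filter (fun x => PySem.Str.isIn "CR" x)).length : Int)),
   ("Total Error Alarms", ((alarms.filter (fun x => PySem.Str.isIn "ER" x)).length : Int))]

-- ===== PRECONDITION & SPEC =====
def Spec_show_pfm_loc_all_totals (sh_cmd_dict : List (String × List (String × String))) (out : List (String × Int)) : Prop := out = show_pfm_loc_all_totals_alt sh_cmd_dict
instance (sh_cmd_dict : List (String × List (String × String))) (out : List (String × Int)) : Decidable (Spec_show_pfm_loc_all_totals sh_cmd_dict out) := by unfold Spec_show_pfm_loc_all_totals; infer_instance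

-- ===== CLAIM (what is proved, stated in full; the proofs are below) =====
def Claim_equal_show_pfm_loc_all_totals : Prop := ∀ (sh_cmd_dict : List (String × List (String × String))), Dom_show_pfm_loc_all_totals sh_cmd_dict → Spec_show_pfm_loc_all_totals sh_cmd_dict (show_pfm_loc_all_totals sh_cmd_dict)

-- ===== LEMMAS AND PROOFS =====

-- the counter dict of A always stays in this shape
def pvC5 (n a e c r : Int) : PySem.Dict String Int :=
  PySem.Dict.mk [("Total Nodes", n), ("Total Alarms", a),
    ("Total Emergency/Alert alarms", e), ("Total Critical Alarms", c), ("Total Error Alarms", r)]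

lemma pvC5_modN (n a e c r : Int) :
    (pvC5 n a e c r).modify "Total Nodes" 0 (· + 1) = pvC5 (n + 1) a e c r := by
  simp [pvC5, PySem.Dict.modify, PySem.Dict.getD, PySem.Dict.get?, PySem.Dict.insert, PySem.Dict.contains]

lemma pvC5_modA (n a e c r : Int) :
    (pvC5 n a e c r).modify "Total Alarms" 0 (· + 1) = pvC5 n (a + 1) e c r := by
  simp [pvC5, PySem.Dict.modify, PySem.Dict.getD, PySem.Dict.get?, PySem.Dict.insert, PySem.Dict.contains]

lemma pvC5_modE (n a e c r : Int) :
    (pvC5 n a e c r).modify "Total Emergency/Alert alarms" 0 (· + 1) = pvC5 n a (e + 1) c r := by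
  simp [pvC5, PySem.Dict.modify, PySem.Dict.getD, PySem.Dict.get?, PySem.Dict.insert, PySem.Dict.contains]

lemma pvC5_modC (n a e c r : Int) :
    (pvC5 n a e c r).modify "Total Critical Alarms" 0 (· + 1) = pvC5 n a e (c + 1) r := by
  simp [pvC5, PySem.Dict.modify, PySem.Dict.getD, PySem.Dict.get?, PySem.Dict.insert, PySem.Dict.contains]

lemma pvC5_modR (n a e c r : Int) :
    (pvC5 n a e c r).modify "Total Error Alarms" 0 (· + 1) = pvC5 n a e c (r + 1) := by
  simp [pvC5, PySem.Dict.modify, PySem.Dict.getD, PySem.Dict.get?, PySem.Dict.insert, PySem.Dict.contains]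

-- A's inner-loop body
def pvStep (c : PySem.Dict String Int) (vv : String × String) : PySem.Dict String Int :=
  if PySem.Str.isIn "NO" vv.2 then c
  else
    let c := c.modify "Total Alarms" 0 (· + 1)
    let c := if PySem.Str.isIn "E/A" vv.2 then c.modify "Total Emergency/Alert alarms" 0 (· + 1) else c
    let c := if PySem.Str.isIn "CR" vv.2 then c.modify "Total Critical Alarms" 0 (· + 1) else c
    if PySem.Str.isIn "ER" vv.2 then c.modify "Total Error Alarms" 0 (· + 1) else c

lemma pvStep_C5 (n a e c r : Int) (vv : String × String) :
    pvStep (pvC5 n a e c r) vv =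
      if PySem.Chars.isIn ['N', 'O'] vv.2.toList then pvC5 n a e c r
      else pvC5 n (a + 1)
        (e + if PySem.Chars.isIn ['E', '/', 'A'] vv.2.toList then 1 else 0)
        (c + if PySem.Chars.isIn ['C', 'R'] vv.2.toList then 1 else 0)
        (r + if PySem.Chars.isIn ['E', 'R'] vv.2.toList then 1 else 0) := by
  by_cases hNO : PySem.Chars.isIn ['N', 'O'] vv.2.toList = true
  · simp [pvStep, hNO]
  · by_cases hE : PySem.Chars.isIn ['E', '/', 'A'] vv.2.toList = true <;>
    by_cases hC : PySem.Chars.isIn ['C', 'R'] vv.2.toList = true <;>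
    by_cases hR : PySem.Chars.isIn ['E', 'R'] vv.2.toList = true <;>
      simp [pvStep, hNO, hE, hC, hR, pvC5_modA, pvC5_modE, pvC5_modC, pvC5_modR]

lemma pvInner (l : List (String × String)) (n a e c r : Int) :
    l.foldl pvStep (pvC5 n a e c r) =
      pvC5 n (a + ((l.filter (fun vv => !PySem.Chars.isIn ['N', 'O'] vv.2.toList)).length : Int))
        (e + (((l.filter (fun vv => !PySem.Chars.isIn ['N', 'O'] vv.2.toList)).map (·.2)).filter (fun x => PySem.Chars.isIn ['E', '/', 'A'] x.toList)).length)
        (c + (((l.filter (fun vv => !PySem.Chars.isIn ['N', 'O'] vv.2.toList)).map (·.2)).filter (fun x => PySem.Chars.isIn ['C', 'R'] x.toList)).length)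
        (r + (((l.filter (fun vv => !PySem.Chars.isIn ['N', 'O'] vv.2.toList)).map (·.2)).filter (fun x => PySem.Chars.isIn ['E', 'R'] x.toList)).length) := by
  induction l generalizing a e c r with
  | nil => simp
  | cons hd tl ih =>
    simp only [List.foldl_cons, pvStep_C5]
    by_cases hNO : PySem.Chars.isIn ['N', 'O'] hd.2.toList = true
    · simp [hNO, ih]
    · rw [if_neg hNO, ih]
      congr 1 <;> simp [hNO, List.filter_cons] <;> (try split_ifs) <;> (try simp only [List.length_cons]) <;> push_cast <;> omega

-- A's outer-loop body
def pvOuter (c : PySem.Dict String Int) (kv : String × List (String × String)) : PySem.Dict String Int :=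
  (PySem.Dict.ofList kv.2).items.foldl pvStep (c.modify "Total Nodes" 0 (· + 1))

def pvAlarms (items : List (String × List (String × String))) : List String :=
  items.flatMap (fun kv => ((PySem.Dict.ofList kv.2).items.filter (fun vv => !PySem.Str.isIn "NO" vv.2)).map (·.2))

lemma pvOuterFold (l : List (String × List (String × String))) (n a e c r : Int) :
    l.foldl pvOuter (pvC5 n a e c r) =
      pvC5 (n + (l.length : Int)) (a + ((pvAlarms l).length : Int))
        (e + ((pvAlarms l).filter (fun x => PySem.Str.isIn "E/A" x)).length)
        (c + ((pvAlarms l).filter (fun x => PySem.Str.isIn "CR" x)).length)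
        (r + ((pvAlarms l).filter (fun x => PySem.Str.isIn "ER" x)).length) := by
  induction l generalizing n a e c r with
  | nil => simp [pvAlarms]
  | cons hd tl ih =>
    simp only [List.foldl_cons, pvOuter, pvC5_modN, pvInner, ih]
    congr 1 <;> simp [pvAlarms, List.filter_append] <;> omega

-- ===== VERDICT (by name: the statement is the Claim_ definition above) =====
theorem show_pfm_loc_all_totals_spec : Claim_equal_show_pfm_loc_all_totals := by
  intro sh _
  show show_pfm_loc_all_totals sh = show_pfm_loc_all_totals_alt sh
  have hA : show_pfm_loc_all_totals sh =
      ((PySem.Dict.ofList sh).items.foldl pvOuter (pvC5 0 0 0 0 0)).items := rfl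
  rw [hA, pvOuterFold]
  simp [show_pfm_loc_all_totals_alt, pvC5, pvAlarms, PySem.Dict.size]
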